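-- pv_equiv track=rewrite | github.com/minhhai2209/investment-notebook | scripts/analysis/build_entry_ladder_eval_report.py | _classify_entry_anchor
-- ===== SOURCE A (Python) =====
-- TACTICAL_ENTRY_ANCHORS = {
--     "valid_bid1",
--     "grid_below_t1",
--     "grid_below_t2",
--     "grid_below_t3",
-- }
--
-- HISTORICAL_ENTRY_ANCHORS = {
--     "forecast_low_t1",
--     "range_low_blend_t5",
--     "range_low_blend_t10",
--     "cycle_drawdown",
--     "atr_1x_below",
--     "atr_1_5x_below",
-- }
--
-- def _classify_entry_anchor(anchor_name: object) -> str: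
--     anchors = {
--         str(part).strip()
--         for part in str(anchor_name or "").split("|")
--         if str(part).strip()
--     }
--     has_historical = any(anchor in HISTORICAL_ENTRY_ANCHORS for anchor in anchors)
--     has_tactical = any(anchor in TACTICAL_ENTRY_ANCHORS for anchor in anchors)
--     if has_historical and has_tactical:
--         return "mixed"
--     if has_historical:
--         return "historical"
--     if has_tactical:
--         return "tactical"
--     return "unknown"
-- ===== SOURCE B (Python) =====
-- ANCHOR_CATEGORY = {
--     "forecast_low_t1": "historical",
--     "range_low_blend_t5": "historical",
--     "range_low_blend_t10": "historical",
--     "cycle_drawdown": "historical",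
--     "atr_1x_below": "historical",
--     "atr_1_5x_below": "historical",
--     "valid_bid1": "tactical",
--     "grid_below_t1": "tactical",
--     "grid_below_t2": "tactical",
--     "grid_below_t3": "tactical",
-- }
--
-- VERDICT = {
--     frozenset(): "unknown",
--     frozenset({"historical"}): "historical",
--     frozenset({"tactical"}): "tactical",
--     frozenset({"historical", "tactical"}): "mixed",
-- }
--
-- def _classify_entry_anchor(anchor_name: object) -> str:
--     labels = frozenset(
--         ANCHOR_CATEGORY[p]
--         for part in str(anchor_name or "").split("|")
--         if (p := part.strip()) in ANCHOR_CATEGORY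
--     )
--     return VERDICT[labels]
-- ===== Notes on version B (the rewrite author's own statement) =====
-- stated objective: alternative
-- what changed: Replaces the set comprehension plus two any-scans and the if-chain with a table-driven classifier: one merged anchor-to-category dict maps each stripped part to its category, and the verdict is a single lookup of the frozenset of categories seen in a 4-entry verdict table, with no flags and no conditional chain.
import Mathlib
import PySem

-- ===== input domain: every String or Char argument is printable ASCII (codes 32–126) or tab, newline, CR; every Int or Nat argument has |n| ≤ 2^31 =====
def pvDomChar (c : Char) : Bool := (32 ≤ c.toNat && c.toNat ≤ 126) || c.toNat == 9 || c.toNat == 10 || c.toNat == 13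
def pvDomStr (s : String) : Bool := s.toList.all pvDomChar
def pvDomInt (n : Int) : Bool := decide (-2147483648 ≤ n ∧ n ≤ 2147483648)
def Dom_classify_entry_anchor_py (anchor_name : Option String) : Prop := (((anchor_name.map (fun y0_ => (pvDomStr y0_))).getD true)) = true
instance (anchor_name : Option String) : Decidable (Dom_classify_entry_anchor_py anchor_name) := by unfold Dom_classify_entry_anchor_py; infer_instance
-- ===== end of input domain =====

-- B is table-driven: one merged anchor→category dict and a verdict table keyed by the set of
-- categories seen, replacing A's two membership any-scans and its if-chain (objective: alternative).

-- ===== PORT A =====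
def pyTacticalAnchors : List String :=
  ["valid_bid1", "grid_below_t1", "grid_below_t2", "grid_below_t3"]

def pyHistoricalAnchors : List String :=
  ["forecast_low_t1", "range_low_blend_t5", "range_low_blend_t10",
   "cycle_drawdown", "atr_1x_below", "atr_1_5x_below"]

def classify_entry_anchor_py (anchor_name : Option String) : String :=
  -- str(anchor_name or ""): None → "", and Some "" is falsy → "" as well (same string)
  let base := anchor_name.getD ""
  let anchors : PySem.Set String :=
    PySem.Set.ofList
      ((((PySem.Str.split? base "|").getD []).map (fun part => PySem.Str.strip part)).filter
        (fun p => p ≠ ""))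
  let has_historical := anchors.any (fun a => pyHistoricalAnchors.contains a)
  let has_tactical := anchors.any (fun a => pyTacticalAnchors.contains a)
  if has_historical && has_tactical then "mixed"
  else if has_historical then "historical"
  else if has_tactical then "tactical"
  else "unknown"

-- ===== PORT B =====
-- ANCHOR_CATEGORY: the merged anchor→category dict of Source B
def anchorCategory : PySem.Dict String String :=
  PySem.Dict.mk
    [("forecast_low_t1", "historical"), ("range_low_blend_t5", "historical"),
     ("range_low_blend_t10", "historical"), ("cycle_drawdown", "historical"),
     ("atr_1x_below", "historical"), ("atr_1_5x_below", "historical"),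
     ("valid_bid1", "tactical"), ("grid_below_t1", "tactical"),
     ("grid_below_t2", "tactical"), ("grid_below_t3", "tactical")]

-- VERDICT: frozenset-of-categories → verdict; a frozenset key is compared by set equality
def verdictTable : List (PySem.Set String × String) :=
  [(PySem.Set.ofList [], "unknown"),
   (PySem.Set.ofList ["historical"], "historical"),
   (PySem.Set.ofList ["tactical"], "tactical"),
   (PySem.Set.ofList ["historical", "tactical"], "mixed")]

def classify_entry_anchor_py_alt (anchor_name : Option String) : String :=
  let labels : PySem.Set String :=
    PySem.Set.ofList
      (((PySem.Str.split? (anchor_name.getD "") "|").getD []).filterMap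
        (fun part => anchorCategory.get? (PySem.Str.strip part)))
  -- VERDICT[labels]: dict lookup with frozenset keys, ported as first set-equal key; the
  -- "" default only makes the lookup total — labels ⊆ {"historical","tactical"}, so a key always matches
  ((verdictTable.find? (fun kv => PySem.Set.equal kv.1 labels)).map (fun kv => kv.2)).getD ""

-- ===== PRECONDITION & SPEC =====
def Spec_classify_entry_anchor_py (anchor_name : Option String) (out : String) : Prop := out = classify_entry_anchor_py_alt anchor_name
instance (anchor_name : Option String) (out : String) : Decidable (Spec_classify_entry_anchor_py anchor_name out) := by unfold Spec_classify_entry_anchor_py; infer_instance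

-- ===== CLAIM (what is proved, stated in full; the proofs are below) =====
def Claim_equal_classify_entry_anchor_py : Prop := ∀ (anchor_name : Option String), Dom_classify_entry_anchor_py anchor_name → Spec_classify_entry_anchor_py anchor_name (classify_entry_anchor_py anchor_name)

-- ===== LEMMAS AND PROOFS =====

-- the decision table both proofs reduce to, parametrised by the two membership facts
def pvClassify (hh ht : Bool) : String :=
  if hh && ht then "mixed"
  else if hh then "historical"
  else if ht then "tactical"
  else "unknown"

lemma any_ofList (l : List String) (f : String → Bool) :
    (PySem.Set.ofList l).any f = l.any f := by
  cases h : l.any f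
  · simp only [List.any_eq_false] at h ⊢
    intro x hx
    exact h x ((PySem.Set.mem_ofList _ _).mp hx)
  · simp only [List.any_eq_true] at h ⊢
    obtain ⟨x, hx, hfx⟩ := h
    exact ⟨x, (PySem.Set.mem_ofList _ _).mpr hx, hfx⟩

lemma hist_ne_empty (p : String) (hp : pyHistoricalAnchors.contains p = true) :
    p ≠ "" := by
  have h : p ∈ pyHistoricalAnchors := by simpa using hp
  simp only [pyHistoricalAnchors, List.mem_cons, List.not_mem_nil, or_false] at h
  rcases h with h|h|h|h|h|h <;> subst h <;> decide

lemma tac_ne_empty (p : String) (hp : pyTacticalAnchors.contains p = true) :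
    p ≠ "" := by
  have h : p ∈ pyTacticalAnchors := by simpa using hp
  simp only [pyTacticalAnchors, List.mem_cons, List.not_mem_nil, or_false] at h
  rcases h with h|h|h|h <;> subst h <;> decide

-- A's filter on non-empty stripped parts is invisible to both membership tests
lemma filter_any (parts : List String) (anch : List String)
    (hne : ∀ p, anch.contains p = true → p ≠ "") :
    (((parts.map (fun part => PySem.Str.strip part)).filter (fun p => p ≠ "")).any
        (fun a => anch.contains a))
      = parts.any (fun q => anch.contains (PySem.Str.strip q)) := by
  rw [List.any_filter, List.any_map]
  have hfun : ((fun p => decide (p ≠ "") && anch.contains p) ∘ (fun part => PySem.Str.strip part))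
      = (fun q => anch.contains (PySem.Str.strip q)) := by
    funext q
    simp only [Function.comp]
    cases h : anch.contains (PySem.Str.strip q)
    · simp
    · simp [hne _ h]
  rw [hfun]

-- the merged dict agrees pointwise with the two anchor lists
lemma get?_cat (p : String) :
    anchorCategory.get? p =
      if pyHistoricalAnchors.contains p = true then some "historical"
      else if pyTacticalAnchors.contains p = true then some "tactical"
      else none := by
  by_cases hH : pyHistoricalAnchors.contains p = true
  · have hm : p ∈ pyHistoricalAnchors := by simpa using hH
    rw [if_pos hH]
    simp only [pyHistoricalAnchors, List.mem_cons, List.not_mem_nil, or_false] at hm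
    rcases hm with h|h|h|h|h|h <;> subst h <;> decide
  · by_cases hT : pyTacticalAnchors.contains p = true
    · have hm : p ∈ pyTacticalAnchors := by simpa using hT
      rw [if_neg hH, if_pos hT]
      simp only [pyTacticalAnchors, List.mem_cons, List.not_mem_nil, or_false] at hm
      rcases hm with h|h|h|h <;> subst h <;> decide
    · rw [if_neg hH, if_neg hT]
      have h1 : ¬ p ∈ pyHistoricalAnchors := by simpa using hH
      have h2 : ¬ p ∈ pyTacticalAnchors := by simpa using hT
      simp only [pyHistoricalAnchors, pyTacticalAnchors, List.mem_cons, List.not_mem_nil,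
        or_false, not_or] at h1 h2
      obtain ⟨n1, n2, n3, n4, n5, n6⟩ := h1
      obtain ⟨m1, m2, m3, m4⟩ := h2
      have bn1 : _ = false := beq_eq_false_iff_ne.mpr (Ne.symm n1)
      have bn2 : _ = false := beq_eq_false_iff_ne.mpr (Ne.symm n2)
      have bn3 : _ = false := beq_eq_false_iff_ne.mpr (Ne.symm n3)
      have bn4 : _ = false := beq_eq_false_iff_ne.mpr (Ne.symm n4)
      have bn5 : _ = false := beq_eq_false_iff_ne.mpr (Ne.symm n5)
      have bn6 : _ = false := beq_eq_false_iff_ne.mpr (Ne.symm n6)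
      have bm1 : _ = false := beq_eq_false_iff_ne.mpr (Ne.symm m1)
      have bm2 : _ = false := beq_eq_false_iff_ne.mpr (Ne.symm m2)
      have bm3 : _ = false := beq_eq_false_iff_ne.mpr (Ne.symm m3)
      have bm4 : _ = false := beq_eq_false_iff_ne.mpr (Ne.symm m4)
      simp [anchorCategory, PySem.Dict.get?, List.find?, bn1, bn2, bn3, bn4, bn5, bn6, bm1, bm2, bm3, bm4]

-- the two constant anchor sets are disjoint
lemma hist_not_tac (p : String) (hp : pyHistoricalAnchors.contains p = true) :
    pyTacticalAnchors.contains p = false := by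
  have h : p ∈ pyHistoricalAnchors := by simpa using hp
  simp only [pyHistoricalAnchors, List.mem_cons, List.not_mem_nil, or_false] at h
  rcases h with h|h|h|h|h|h <;> subst h <;> decide

lemma get?_cat_hist (p : String) :
    (anchorCategory.get? p = some "historical") ↔ pyHistoricalAnchors.contains p = true := by
  rw [get?_cat]
  split_ifs with h1 h2 <;> simp_all

lemma get?_cat_tac (p : String) :
    (anchorCategory.get? p = some "tactical") ↔ pyTacticalAnchors.contains p = true := by
  rw [get?_cat]
  split_ifs with h1 h2
  · rw [hist_not_tac p h1]; simp
  · exact ⟨fun _ => h2, fun _ => rfl⟩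
  · simp_all

-- Set.equal unfolded to the two containment scans (definitional)
lemma equal_eq (a s : List String) :
    PySem.Set.equal a s = (a.all (fun x => s.contains x) && s.all (fun x => a.contains x)) := rfl

-- the verdict-table lookup computes the decision table on any set of categories
lemma lookup_eq (s : List String) (hs : ∀ x ∈ s, x = "historical" ∨ x = "tactical") :
    ((verdictTable.find? (fun kv => PySem.Set.equal kv.1 s)).map (fun kv => kv.2)).getD ""
      = pvClassify (s.contains "historical") (s.contains "tactical") := by
  by_cases hh : "historical" ∈ s <;> by_cases ht : "tactical" ∈ s
  · -- both present → "mixed"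
    have ch : s.contains "historical" = true := List.elem_eq_true_of_mem hh
    have ct : s.contains "tactical" = true := List.elem_eq_true_of_mem ht
    have e0 : PySem.Set.equal ([] : List String) s = false := by
      rw [equal_eq,
        Bool.and_eq_false_iff]
      exact Or.inr (List.all_eq_false.mpr ⟨"historical", hh, by decide⟩)
    have e1 : PySem.Set.equal (["historical"] : List String) s = false := by
      rw [equal_eq,
        Bool.and_eq_false_iff]
      exact Or.inr (List.all_eq_false.mpr ⟨"tactical", ht, by decide⟩)
    have e2 : PySem.Set.equal (["tactical"] : List String) s = false := by
      rw [equal_eq,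
        Bool.and_eq_false_iff]
      exact Or.inr (List.all_eq_false.mpr ⟨"historical", hh, by decide⟩)
    have e3 : PySem.Set.equal (["historical", "tactical"] : List String) s = true := by
      rw [equal_eq, Bool.and_eq_true]
      refine ⟨List.all_eq_true.mpr fun x hx => ?_, List.all_eq_true.mpr fun x hx => ?_⟩
      · rcases List.mem_cons.mp hx with h | h
        · subst h; exact ch
        · simp only [List.mem_singleton] at h; subst h; exact ct
      · rcases hs x hx with h | h <;> subst h <;> decide
    have vt : verdictTable = [(([] : List String), "unknown"), ((["historical"] : List String), "historical"),
        ((["tactical"] : List String), "tactical"), ((["historical", "tactical"] : List String), "mixed")] := by decide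
    rw [vt]
    simp [List.find?, e0, e1, e2, e3, pvClassify, hh, ht]
  · -- historical only
    have ch : s.contains "historical" = true := List.elem_eq_true_of_mem hh
    have ct : s.contains "tactical" = false := by
      cases h : s.contains "tactical"
      · rfl
      · exact absurd (List.mem_of_elem_eq_true h) ht
    have e0 : PySem.Set.equal ([] : List String) s = false := by
      rw [equal_eq,
        Bool.and_eq_false_iff]
      exact Or.inr (List.all_eq_false.mpr ⟨"historical", hh, by decide⟩)
    have e1 : PySem.Set.equal (["historical"] : List String) s = true := by
      rw [equal_eq,
        Bool.and_eq_true]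
      refine ⟨List.all_eq_true.mpr fun x hx => ?_, List.all_eq_true.mpr fun x hx => ?_⟩
      · simp only [List.mem_singleton] at hx; subst hx; exact ch
      · rcases hs x hx with h | h
        · subst h; decide
        · subst h; exact absurd hx ht
    have vt : verdictTable = [(([] : List String), "unknown"), ((["historical"] : List String), "historical"),
        ((["tactical"] : List String), "tactical"), ((["historical", "tactical"] : List String), "mixed")] := by decide
    rw [vt]
    simp [List.find?, e0, e1, pvClassify, hh, ht]
  · -- tactical only
    have ct : s.contains "tactical" = true := List.elem_eq_true_of_mem ht
    have ch : s.contains "historical" = false := by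
      cases h : s.contains "historical"
      · rfl
      · exact absurd (List.mem_of_elem_eq_true h) hh
    have e0 : PySem.Set.equal ([] : List String) s = false := by
      rw [equal_eq,
        Bool.and_eq_false_iff]
      exact Or.inr (List.all_eq_false.mpr ⟨"tactical", ht, by decide⟩)
    have e1 : PySem.Set.equal (["historical"] : List String) s = false := by
      rw [equal_eq,
        Bool.and_eq_false_iff]
      exact Or.inl (List.all_eq_false.mpr ⟨"historical", by decide, by simpa using hh⟩)
    have e2 : PySem.Set.equal (["tactical"] : List String) s = true := by
      rw [equal_eq,
        Bool.and_eq_true]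
      refine ⟨List.all_eq_true.mpr fun x hx => ?_, List.all_eq_true.mpr fun x hx => ?_⟩
      · simp only [List.mem_singleton] at hx; subst hx; exact ct
      · rcases hs x hx with h | h
        · subst h; exact absurd hx hh
        · subst h; decide
    have vt : verdictTable = [(([] : List String), "unknown"), ((["historical"] : List String), "historical"),
        ((["tactical"] : List String), "tactical"), ((["historical", "tactical"] : List String), "mixed")] := by decide
    rw [vt]
    simp [List.find?, e0, e1, e2, pvClassify, hh, ht]
  · -- neither → s is empty → "unknown"
    have hs0 : s = [] := by
      rw [List.eq_nil_iff_forall_not_mem]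
      intro x hx
      rcases hs x hx with h | h <;> subst h
      · exact hh hx
      · exact ht hx
    subst hs0
    decide

-- ===== VERDICT (by name: the statement is the Claim_ definition above) =====
theorem classify_entry_anchor_py_spec : Claim_equal_classify_entry_anchor_py := by
  intro anchor_name _
  unfold Spec_classify_entry_anchor_py classify_entry_anchor_py classify_entry_anchor_py_alt
  simp only []
  generalize (PySem.Str.split? (anchor_name.getD "") "|").getD [] = parts
  -- A side → pvClassify of the two any-scans
  rw [any_ofList, any_ofList, filter_any _ _ hist_ne_empty, filter_any _ _ tac_ne_empty]
  -- B side: the label list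
  set L := parts.filterMap (fun part => anchorCategory.get? (PySem.Str.strip part)) with hL
  have hsub : ∀ x ∈ PySem.Set.ofList L, x = "historical" ∨ x = "tactical" := by
    intro x hx
    have hxL : x ∈ L := (PySem.Set.mem_ofList _ _).mp hx
    obtain ⟨part, _, hget⟩ := List.mem_filterMap.mp hxL
    rw [get?_cat] at hget
    split_ifs at hget <;> simp_all
  rw [lookup_eq _ hsub]
  -- the two memberships of the label set are exactly A's two any-scans
  have hH : List.contains (PySem.Set.ofList L) "historical"
      = parts.any (fun q => pyHistoricalAnchors.contains (PySem.Str.strip q)) := by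
    cases h : parts.any (fun q => pyHistoricalAnchors.contains (PySem.Str.strip q))
    · cases hc : List.contains (PySem.Set.ofList L) "historical"
      · rfl
      · exfalso
        have hm : "historical" ∈ L :=
          (PySem.Set.mem_ofList _ _).mp (List.mem_of_elem_eq_true hc)
        obtain ⟨part, hpart, hget⟩ := List.mem_filterMap.mp hm
        have := (get?_cat_hist _).mp hget
        rw [List.any_eq_false] at h
        exact absurd this (by simpa using h part hpart)
    · rw [List.any_eq_true] at h
      obtain ⟨part, hpart, hcont⟩ := h
      apply List.elem_eq_true_of_mem
      refine (PySem.Set.mem_ofList _ _).mpr (List.mem_filterMap.mpr ⟨part, hpart, ?_⟩)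
      exact (get?_cat_hist _).mpr hcont
  have hT : List.contains (PySem.Set.ofList L) "tactical"
      = parts.any (fun q => pyTacticalAnchors.contains (PySem.Str.strip q)) := by
    cases h : parts.any (fun q => pyTacticalAnchors.contains (PySem.Str.strip q))
    · cases hc : List.contains (PySem.Set.ofList L) "tactical"
      · rfl
      · exfalso
        have hm : "tactical" ∈ L :=
          (PySem.Set.mem_ofList _ _).mp (List.mem_of_elem_eq_true hc)
        obtain ⟨part, hpart, hget⟩ := List.mem_filterMap.mp hm
        have := (get?_cat_tac _).mp hget
        rw [List.any_eq_false] at h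
        exact absurd this (by simpa using h part hpart)
    · rw [List.any_eq_true] at h
      obtain ⟨part, hpart, hcont⟩ := h
      apply List.elem_eq_true_of_mem
      refine (PySem.Set.mem_ofList _ _).mpr (List.mem_filterMap.mpr ⟨part, hpart, ?_⟩)
      exact (get?_cat_tac _).mpr hcont
  rw [hH, hT]
  rfl
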